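-- pv_equiv track=rewrite | github.com/AliBehrouzinia/Begard-Webapp | Begard_Project/Begard_project/begard_app/time_table.py | get_least_used
-- ===== SOURCE A (Python) =====
-- def get_least_used(tags, chosen_so_far):
--     if len(tags) == 1:
--         return tags[0]
--
--     my_list = {}
--     for t in tags:
--         my_list[t] = chosen_so_far[t]
--
--     tag = sorted(my_list.items(), key=lambda items: items[1])[0]
--
--     return tag[0]
-- ===== SOURCE B (Python) =====
-- def get_least_used(tags, chosen_so_far):
--     if len(tags) <= 1:
--         return tags[0]
--     best = tags[0]
--     best_count = chosen_so_far[best]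
--     for t in tags[1:]:
--         c = chosen_so_far[t]
--         if c < best_count:
--             best, best_count = t, c
--     return best
-- ===== Notes on version B (the rewrite author's own statement) =====
-- stated objective: simpler
-- what changed: Replaces the dict-building pass plus full sort with a single running-minimum scan over tags (first strict minimum wins), with no intermediate dict and no sort.
import Mathlib
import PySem

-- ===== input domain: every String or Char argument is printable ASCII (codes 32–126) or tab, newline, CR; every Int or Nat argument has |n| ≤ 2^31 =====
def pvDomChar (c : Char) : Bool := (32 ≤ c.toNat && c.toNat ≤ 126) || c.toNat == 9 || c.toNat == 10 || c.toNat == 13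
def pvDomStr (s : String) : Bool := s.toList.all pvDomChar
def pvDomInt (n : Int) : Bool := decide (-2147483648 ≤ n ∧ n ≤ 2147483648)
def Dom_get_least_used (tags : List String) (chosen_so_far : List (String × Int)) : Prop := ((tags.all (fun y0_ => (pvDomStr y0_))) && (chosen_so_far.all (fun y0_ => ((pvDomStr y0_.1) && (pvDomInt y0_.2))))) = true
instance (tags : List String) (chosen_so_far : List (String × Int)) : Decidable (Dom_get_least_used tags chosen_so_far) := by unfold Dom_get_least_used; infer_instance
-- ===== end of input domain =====

-- B replaces the dict-building pass plus the full sort by a single running-minimum scan (simpler, one pass).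

-- ===== PORT A =====
def get_least_used (tags : List String) (chosen_so_far : List (String × Int)) : String :=
  if tags.length = 1 then
    PySem.List.pyGetD tags 0 ""
  else
    let d := PySem.Dict.mk chosen_so_far
    let my_list := tags.foldl (fun m t => m.insert t (d.getD t 0)) PySem.Dict.empty
    let tag := PySem.List.pyGetD (PySem.List.sorted my_list.items (fun p => p.2)) 0 ("", 0)
    tag.1

-- ===== PORT B =====
def get_least_used_alt (tags : List String) (chosen_so_far : List (String × Int)) : String :=
  if tags.length ≤ 1 then
    PySem.List.pyGetD tags 0 ""
  else
    let d := PySem.Dict.mk chosen_so_far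
    let best := PySem.List.pyGetD tags 0 ""
    let r := (PySem.List.slice tags (some 1) none).foldl
      (fun b t => let c := d.getD t 0; if c < b.2 then (t, c) else b)
      (best, d.getD best 0)
    r.1

-- ===== PRECONDITION & SPEC =====
-- Pre_ excludes exactly where the Python A raises: empty tags (IndexError on sorted(...)[0] / tags[0])
-- and, when len(tags) ≠ 1, a tag missing from chosen_so_far (KeyError).
def Pre_get_least_used (tags : List String) (chosen_so_far : List (String × Int)) : Prop :=
  tags ≠ [] ∧ (tags.length = 1 ∨ ∀ t ∈ tags, t ∈ chosen_so_far.map Prod.fst)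
instance (tags : List String) (chosen_so_far : List (String × Int)) : Decidable (Pre_get_least_used tags chosen_so_far) := by unfold Pre_get_least_used; infer_instance
def pvWitness_get_least_used : List String × (List (String × Int)) := (["a", "b"], [("a", 1), ("b", 0)])

def Spec_get_least_used (tags : List String) (chosen_so_far : List (String × Int)) (out : String) : Prop := out = get_least_used_alt tags chosen_so_far
instance (tags : List String) (chosen_so_far : List (String × Int)) (out : String) : Decidable (Spec_get_least_used tags chosen_so_far out) := by unfold Spec_get_least_used; infer_instance

-- ===== CLAIM (what is proved, stated in full; the proofs are below) =====
def Claim_equal_get_least_used : Prop := ∀ (tags : List String) (chosen_so_far : List (String × Int)), Dom_get_least_used tags chosen_so_far → Pre_get_least_used tags chosen_so_far → Spec_get_least_used tags chosen_so_far (get_least_used tags chosen_so_far)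

-- ===== LEMMAS AND PROOFS =====

-- the value stored for key k by A's dict-building loop is f k (it only depends on the key)
theorem pv_getD_foldl_insert (f : String → Int) (k : String) :
    ∀ (l : List String) (m : PySem.Dict String Int),
      (l.foldl (fun m t => m.insert t (f t)) m).getD k 0
        = if k ∈ l then f k else m.getD k 0 := by
  intro l
  induction l with
  | nil => intro m; simp
  | cons t l ih =>
    intro m
    simp only [List.foldl_cons, ih, PySem.Dict.getD_insert, List.mem_cons]
    by_cases hl : k ∈ l <;> by_cases hk : k = t <;> simp [hl, hk]

-- the head of Python's stable insertion sort is the running strict minimum (first minimum wins)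
theorem pv_head_foldl_insertBy :
    ∀ (xs : List (String × Int)) (a : String × Int) (acc : List (String × Int)),
      ∃ tl, xs.foldl (fun ac x => PySem.List.insertBy (fun p q => decide (p.2 < q.2)) x ac) (a :: acc)
              = (xs.foldl (fun b x => if x.2 < b.2 then x else b) a) :: tl := by
  intro xs
  induction xs with
  | nil => intro a acc; exact ⟨acc, rfl⟩
  | cons x xs ih =>
    intro a acc
    simp only [List.foldl_cons, PySem.List.insertBy]
    by_cases h : x.2 < a.2
    · simpa [h] using ih x (a :: acc)
    · simpa [h] using ih a (PySem.List.insertBy (fun p q => decide (p.2 < q.2)) x acc)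

-- the dedup pass of A (Set.add fold) does not change the running strict minimum
theorem pv_dedup_min (f : String → Int) :
    ∀ (rest s : List String) (b : String × Int), (∀ t ∈ s, b.2 ≤ f t) →
      ∃ pre, rest.foldl PySem.Set.add s = s ++ pre
        ∧ (∀ x ∈ pre, x ∈ rest)
        ∧ pre.foldl (fun b t => if f t < b.2 then (t, f t) else b) b
            = rest.foldl (fun b t => if f t < b.2 then (t, f t) else b) b := by
  intro rest
  induction rest with
  | nil => intro s b _; exact ⟨[], by simp⟩
  | cons t rest ih =>
    intro s b hb
    simp only [List.foldl_cons, PySem.Set.add]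
    by_cases hts : t ∈ s
    · have hstep : (if f t < b.2 then (t, f t) else b) = b := by
        have := hb t hts
        simp [not_lt.mpr this]
      obtain ⟨pre, h1, h2, h3⟩ := ih s b hb
      refine ⟨pre, ?_, fun x hx => .tail _ (h2 x hx), ?_⟩
      · simpa [PySem.Set.contains, hts] using h1
      · rw [hstep]; exact h3
    · have hstep2 : ∀ u ∈ s ++ [t], (if f t < b.2 then (t, f t) else b).2 ≤ f u := by
        intro u hu
        rcases List.mem_append.1 hu with hu | hu
        · have h1 := hb u hu
          by_cases hlt : f t < b.2
          · simp only [if_pos hlt]; omega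
          · simp only [if_neg hlt]; exact h1
        · simp only [List.mem_singleton] at hu
          rw [hu]
          by_cases hlt : f t < b.2
          · simp [hlt]
          · simp only [if_neg hlt]; omega
      obtain ⟨pre, h1, h2, h3⟩ := ih (s ++ [t]) (if f t < b.2 then (t, f t) else b) hstep2
      refine ⟨t :: pre, ?_, ?_, ?_⟩
      · rw [List.append_assoc] at h1
        simpa [PySem.Set.contains, hts] using h1
      · intro x hx
        rcases List.mem_cons.1 hx with rfl | hx
        · exact .head _
        · exact .tail _ (h2 x hx)
      · simpa using h3

-- ===== VERDICT (by name: the statement is the Claim_ definition above) =====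
theorem get_least_used_spec : Claim_equal_get_least_used := by
  intro tags chosen _dom hpre
  unfold Spec_get_least_used
  obtain ⟨hne, -⟩ := hpre
  by_cases h1 : tags.length = 1
  · simp [get_least_used, get_least_used_alt, h1]
  · obtain ⟨t0, rest, rfl⟩ : ∃ t0 rest, tags = t0 :: rest := by
      cases tags with
      | nil => exact absurd rfl hne
      | cons a l => exact ⟨a, l, rfl⟩
    have h2 : ¬ (t0 :: rest).length ≤ 1 := by
      simp only [List.length_cons] at h1 ⊢
      omega
    set f : String → Int := fun t => (PySem.Dict.mk chosen).getD t 0 with hf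
    -- B side
    have hB : get_least_used_alt (t0 :: rest) chosen
        = (rest.foldl (fun b t => if f t < b.2 then (t, f t) else b) (t0, f t0)).1 := by
      have hr : rest ≠ [] := by
        intro h; rw [h] at h2; simp at h2
      simp [get_least_used_alt, hr, PySem.List.slice_from_one, PySem.List.pyGetD_zero_cons, hf]
    -- A side
    obtain ⟨pre, hkeys, hsub, hfold⟩ :=
      pv_dedup_min f rest [t0] (t0, f t0) (by intro t ht; simp only [List.mem_singleton] at ht; simp [ht])
    have hml : ((t0 :: rest).foldl (fun m t => m.insert t (f t)) PySem.Dict.empty).keys = t0 :: pre := by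
      rw [PySem.Dict.keys_foldl_insert]
      simp only [PySem.Set.update, PySem.Dict.keys_empty]
      have : PySem.Set.add ([] : List String) t0 = [t0] := by simp [PySem.Set.add]
      simp only [List.foldl_cons, this, hkeys]
      rfl
    have hnd : ((t0 :: rest).foldl (fun m t => m.insert t (f t)) PySem.Dict.empty).keys.Nodup :=
      PySem.Dict.nodup_keys_foldl_insert _ _ _ (by simp [PySem.Dict.keys_empty])
    have hitems : ((t0 :: rest).foldl (fun m t => m.insert t (f t)) PySem.Dict.empty).items
        = (t0 :: pre).map (fun k => (k, f k)) := by
      rw [PySem.Dict.items_eq_map_keys _ hnd 0, hml]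
      apply List.map_congr_left
      intro k hk
      have hmem : k ∈ t0 :: rest := by
        rcases List.mem_cons.1 hk with rfl | hk
        · exact .head _
        · exact .tail _ (hsub k hk)
      rw [pv_getD_foldl_insert f k (t0 :: rest) PySem.Dict.empty, if_pos hmem]
    obtain ⟨tl, htl⟩ := pv_head_foldl_insertBy (pre.map (fun k => (k, f k))) (t0, f t0) []
    have hA : get_least_used (t0 :: rest) chosen
        = ((pre.map (fun k => (k, f k))).foldl (fun b x => if x.2 < b.2 then x else b) (t0, f t0)).1 := by
      simp only [get_least_used, if_neg h1]
      rw [show (fun (m : PySem.Dict String Int) (t : String) => m.insert t ((PySem.Dict.mk chosen).getD t 0))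
            = (fun m t => m.insert t (f t)) from rfl]
      rw [PySem.List.sorted_eq_foldl_insertBy, hitems]
      simp only [List.map_cons, List.foldl_cons]
      rw [show PySem.List.insertBy (fun p q => decide (p.2 < q.2)) (t0, f t0) [] = [(t0, f t0)] from rfl]
      rw [htl, PySem.List.pyGetD_zero_cons]
    rw [hA, hB, List.foldl_map]
    simp only [← hfold]
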